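-- pv_equiv track=rewrite | github.com/ssharma25/Follow-The-Money | Code/common_methodsArticles.py | dict_sum
-- ===== SOURCE A (Python) =====
-- def dict_sum(_dict, doc, case='n'):
-- 	sum = 0
-- 	if case=='i':
-- 		doc=doc.lower()
-- 	elif case=='n':
-- 		pass
-- 	for i in _dict:
-- 		sum = sum + doc.count(i)
-- 	#[data.count(i) for i in _dict]
-- 	return sum
-- ===== SOURCE B (Python) =====
-- def dict_sum(_dict, doc, case='n'):
--     if case == 'i':
--         doc = doc.lower()
--     mult = {}
--     for p in _dict:
--         mult[p] = mult.get(p, 0) + 1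
--     total = 0
--     for p, m in mult.items():
--         total += m * doc.count(p)
--     return total
-- ===== Notes on version B (the rewrite author's own statement) =====
-- stated objective: faster
-- what changed: Instead of scanning doc once per list entry, B first builds a multiplicity counter over _dict and then counts each distinct pattern in doc once, weighting by multiplicity.
import Mathlib
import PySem

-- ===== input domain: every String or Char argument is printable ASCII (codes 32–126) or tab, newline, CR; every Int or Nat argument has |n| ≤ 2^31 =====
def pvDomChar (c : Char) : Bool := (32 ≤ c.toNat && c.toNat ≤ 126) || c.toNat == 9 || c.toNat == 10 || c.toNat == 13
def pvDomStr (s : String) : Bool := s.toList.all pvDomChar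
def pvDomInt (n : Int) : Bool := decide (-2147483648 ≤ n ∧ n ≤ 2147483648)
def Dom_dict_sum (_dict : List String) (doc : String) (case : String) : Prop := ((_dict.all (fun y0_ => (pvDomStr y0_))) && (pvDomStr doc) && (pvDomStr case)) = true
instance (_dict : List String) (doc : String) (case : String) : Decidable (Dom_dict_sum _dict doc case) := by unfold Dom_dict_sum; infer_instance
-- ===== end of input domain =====

-- B replaces A's per-entry scan of doc by a multiplicity counter over _dict followed by
-- one count per distinct pattern (objective: alternative algorithm, same results).


-- ===== PORT A =====
def dict_sum (_dict : List String) (doc : String) (case : String) : Int :=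
  let sum : Int := 0
  let doc := if case == "i" then PySem.Str.lower doc else doc
  _dict.foldl (fun sum i => sum + (PySem.Str.count doc i : Int)) sum

-- ===== PORT B =====
def dict_sum_alt (_dict : List String) (doc : String) (case : String) : Int :=
  let doc := if case == "i" then PySem.Str.lower doc else doc
  let mult : PySem.Dict String Int :=
    _dict.foldl (fun d p => d.insert p (d.getD p 0 + 1)) PySem.Dict.empty
  mult.items.foldl (fun total pm => total + pm.2 * (PySem.Str.count doc pm.1 : Int)) 0

-- ===== PRECONDITION & SPEC =====
def Spec_dict_sum (_dict : List String) (doc : String) (case : String) (out : Int) : Prop := out = dict_sum_alt _dict doc case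
instance (_dict : List String) (doc : String) (case : String) (out : Int) : Decidable (Spec_dict_sum _dict doc case out) := by unfold Spec_dict_sum; infer_instance

-- ===== CLAIM (what is proved, stated in full; the proofs are below) =====
def Claim_equal_dict_sum : Prop := ∀ (_dict : List String) (doc : String) (case : String), Dom_dict_sum _dict doc case → Spec_dict_sum _dict doc case (dict_sum _dict doc case)

-- ===== LEMMAS AND PROOFS =====

lemma pv_foldl_add_eq_sum (g : String → Int) (l : List String) (a : Int) :
    l.foldl (fun acc x => acc + g x) a = a + (l.map g).sum := by
  induction l generalizing a with
  | nil => simp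
  | cons x xs ih => simp [ih, add_assoc]

lemma pv_foldl_pair_add_eq_sum (g : String × Int → Int) (l : List (String × Int)) (a : Int) :
    l.foldl (fun acc pm => acc + g pm) a = a + (l.map g).sum := by
  induction l generalizing a with
  | nil => simp
  | cons x xs ih => simp [ih, add_assoc]

-- splitting a sum over xs at the occurrences of k
lemma pv_sum_split (f : String → Int) (k : String) (xs : List String) :
    ((xs.map f).sum : Int)
      = (xs.count k : Int) * f k + ((xs.filter (fun x => !(x == k))).map f).sum := by
  induction xs with
  | nil => simp
  | cons x xs ih =>
    by_cases h : x = k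
    · subst h
      simp [ih]
      ring
    · have hb : (x == k) = false := by simp [h]
      simp [hb, h, ih]
      ring

-- main: summing count·f over a nodup superset of xs's elements equals summing f over xs
lemma pv_sum_counter (f : String → Int) :
    ∀ (s xs : List String), s.Nodup → (∀ x ∈ xs, x ∈ s) →
      ((s.map (fun k => (xs.count k : Int) * f k)).sum) = (xs.map f).sum := by
  intro s
  induction s with
  | nil =>
    intro xs _ hsub
    have : xs = [] := List.eq_nil_iff_forall_not_mem.mpr (fun x hx => by simpa using hsub x hx)
    simp [this]
  | cons k s ih =>
    intro xs hnd hsub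
    have hk : k ∉ s := (List.nodup_cons.mp hnd).1
    have hnd' : s.Nodup := (List.nodup_cons.mp hnd).2
    set xs' := xs.filter (fun x => !(x == k)) with hxs'
    have hsub' : ∀ x ∈ xs', x ∈ s := by
      intro x hx
      have hmem := List.mem_of_mem_filter hx
      have hprop := List.of_mem_filter hx
      have hxk : x ≠ k := by
        intro h; subst h; simp at hprop
      rcases List.mem_cons.mp (hsub x hmem) with h | h
      · exact absurd h hxk
      · exact h
    have hcnt : ∀ k' ∈ s, (xs.count k' : Int) = (xs'.count k' : Int) := by
      intro k' hk'
      have hne : (k' == k) = false := by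
        simp only [beq_eq_false_iff_ne]
        intro h; subst h; exact hk hk'
      rw [hxs', List.count_filter (by simp [hne])]
    have hmaps : s.map (fun k' => (xs.count k' : Int) * f k')
        = s.map (fun k' => (xs'.count k' : Int) * f k') := by
      apply List.map_congr_left
      intro k' hk'
      rw [hcnt k' hk']
    calc ((k :: s).map (fun k' => (xs.count k' : Int) * f k')).sum
        = (xs.count k : Int) * f k + (s.map (fun k' => (xs.count k' : Int) * f k')).sum := by
          simp
      _ = (xs.count k : Int) * f k + (xs'.map f).sum := by
          rw [hmaps, ih xs' hnd' hsub']
      _ = (xs.map f).sum := (pv_sum_split f k xs).symm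

-- ===== VERDICT (by name: the statement is the Claim_ definition above) =====
theorem dict_sum_spec : Claim_equal_dict_sum := by
  intro _dict doc case _
  unfold Spec_dict_sum dict_sum dict_sum_alt
  simp only [PySem.Dict.foldl_insert_getD_add_one_eq_counter, PySem.Dict.items_counter]
  set d := if case == "i" then PySem.Str.lower doc else doc
  rw [pv_foldl_add_eq_sum, pv_foldl_pair_add_eq_sum, List.map_map]
  rw [zero_add, zero_add]
  have := pv_sum_counter (fun p => (PySem.Str.count d p : Int)) (PySem.Set.ofList _dict) _dict
    (PySem.Set.nodup_ofList _dict) (fun x hx => (PySem.Set.mem_ofList _dict x).mpr hx)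
  simpa [Function.comp] using this.symm
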